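-- pv_equiv track=rewrite | github.com/TADIYOS49/competitive_programming | B_Candy_Box.py | solve
-- ===== SOURCE A (Python) =====
-- def solve(n,arr):
--     freq = {}
--     for i in arr:
--         if i in freq:
--             freq[i] += 1
--         else:
--             freq[i] = 1
--     counts = list(freq.values())
--     res = []
--     for i in counts:
--         if i not in res:
--             res.append(i)
--         else:
--             while i > 0:
--                 if i not in res:
--                     res.append(i)
--                     break
--                 else:
--                     i -= 1
--     return sum(res)
-- ===== SOURCE B (Python) =====
-- def solve(n, arr):
--     freq = {}
--     for x in arr:
--         freq[x] = freq.get(x, 0) + 1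
--     total = 0
--     prev = len(arr) + 1
--     for c in sorted(freq.values(), reverse=True):
--         take = min(c, prev - 1)
--         if take < 0:
--             take = 0
--         total += take
--         prev = take
--     return total
-- ===== Notes on version B (the rewrite author's own statement) =====
-- stated objective: alternative
-- what changed: Replaced the decrement-and-scan greedy over a growing membership list by sorting the multiplicities in decreasing order and taking each as min(count, previous_take - 1) clamped at 0 in one pass (correct because the greedy's chosen set is order-independent).
import Mathlib
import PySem

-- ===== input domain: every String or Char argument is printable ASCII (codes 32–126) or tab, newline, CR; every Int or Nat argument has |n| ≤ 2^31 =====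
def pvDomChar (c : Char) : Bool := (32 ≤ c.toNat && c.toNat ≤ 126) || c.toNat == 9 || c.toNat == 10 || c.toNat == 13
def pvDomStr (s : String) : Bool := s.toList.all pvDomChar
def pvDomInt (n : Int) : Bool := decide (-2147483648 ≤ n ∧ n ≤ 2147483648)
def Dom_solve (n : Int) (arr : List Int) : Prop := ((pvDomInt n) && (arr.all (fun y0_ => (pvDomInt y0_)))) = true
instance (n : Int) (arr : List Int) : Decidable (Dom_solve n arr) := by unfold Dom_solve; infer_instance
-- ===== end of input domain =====

-- B replaces A's decrement-and-scan greedy over a growing membership list by a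
-- sort-descending one-pass greedy (objective: alternative algorithm).

-- ===== PORT A =====
-- freq-building loop: if i in freq: freq[i] += 1 else: freq[i] = 1
def freqStepA (d : PySem.Dict Int Int) (i : Int) : PySem.Dict Int Int :=
  if d.contains i then d.modify i 0 (· + 1) else d.insert i 1

-- the inner 'while i > 0: if i not in res: res.append(i); break else: i -= 1'
def whileA (res : List Int) (i : Int) : List Int :=
  if 0 < i then
    if res.contains i then whileA res (i - 1) else res ++ [i]
  else res
termination_by i.toNat
decreasing_by omega

-- outer loop body: if i not in res: res.append(i) else: <while loop>
def stepA (res : List Int) (i : Int) : List Int :=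
  if res.contains i then whileA res i else res ++ [i]

def solve (n : Int) (arr : List Int) : Int :=
  let freq := arr.foldl freqStepA PySem.Dict.empty
  let counts := freq.values
  (counts.foldl stepA []).sum

-- ===== PORT B =====
def solve_alt (n : Int) (arr : List Int) : Int :=
  let freq := arr.foldl (fun d x => d.insert x (d.getD x 0 + 1)) PySem.Dict.empty
  let st := (PySem.List.sorted freq.values (fun c => c) true).foldl
    (fun (st : Int × Int) c =>
      let take := min c (st.2 - 1)
      let take := if take < 0 then 0 else take
      (st.1 + take, take))
    (0, (arr.length : Int) + 1)
  st.1

-- ===== PRECONDITION & SPEC =====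
def Spec_solve (n : Int) (arr : List Int) (out : Int) : Prop := out = solve_alt n arr
instance (n : Int) (arr : List Int) (out : Int) : Decidable (Spec_solve n arr out) := by unfold Spec_solve; infer_instance

-- ===== CLAIM (what is proved, stated in full; the proofs are below) =====
def Claim_equal_solve : Prop := ∀ (n : Int) (arr : List Int), Dom_solve n arr → Spec_solve n arr (solve n arr)

-- ===== LEMMAS AND PROOFS =====

-- abstract greedy pick: the largest free value v with 1 ≤ v ≤ c (computed by downward scan)
def Ffree (S : Finset ℤ) (c : ℤ) : Option ℤ :=
  if 0 < c then
    if c ∈ S then Ffree S (c - 1) else some c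
  else none
termination_by c.toNat
decreasing_by omega

-- abstract greedy step on a finite set
def stepS (S : Finset ℤ) (c : ℤ) : Finset ℤ :=
  match Ffree S c with
  | some v => insert v S
  | none => S

-- characterization of Ffree
theorem Ffree_spec (S : Finset ℤ) : ∀ (n : ℕ) (c : ℤ), c.toNat ≤ n →
    (match Ffree S c with
     | none => ∀ v : ℤ, 1 ≤ v → v ≤ c → v ∈ S
     | some a => 1 ≤ a ∧ a ≤ c ∧ a ∉ S ∧ ∀ v : ℤ, 1 ≤ v → v ≤ c → v ∉ S → v ≤ a) := by
  intro n
  induction n with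
  | zero =>
    intro c hc
    have hc0 : c ≤ 0 := by omega
    rw [Ffree]
    simp only [if_neg (by omega : ¬ 0 < c)]
    intro v h1 h2; omega
  | succ m ih =>
    intro c hc
    rw [Ffree]
    by_cases hpos : 0 < c
    · simp only [if_pos hpos]
      by_cases hmem : c ∈ S
      · simp only [if_pos hmem]
        have := ih (c - 1) (by omega)
        rcases h : Ffree S (c - 1) with _ | a
        · rw [h] at this
          intro v h1 h2
          rcases eq_or_lt_of_le h2 with rfl | hlt
          · exact hmem
          · exact this v h1 (by omega)
        · rw [h] at this
          refine ⟨this.1, by omega, this.2.2.1, ?_⟩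
          intro v h1 h2 h3
          rcases eq_or_lt_of_le h2 with rfl | hlt
          · exact absurd hmem h3
          · exact this.2.2.2 v h1 (by omega) h3
      · simp only [if_neg hmem]
        exact ⟨by omega, le_refl c, hmem, fun v h1 h2 _ => h2⟩
    · simp only [if_neg hpos]
      intro v h1 h2; omega

theorem Ffree_some_props {S : Finset ℤ} {c a : ℤ} (h : Ffree S c = some a) :
    1 ≤ a ∧ a ≤ c ∧ a ∉ S ∧ ∀ v : ℤ, 1 ≤ v → v ≤ c → v ∉ S → v ≤ a := by
  have := Ffree_spec S c.toNat c (le_refl _)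
  rwa [h] at this

theorem Ffree_none_props {S : Finset ℤ} {c : ℤ} (h : Ffree S c = none) :
    ∀ v : ℤ, 1 ≤ v → v ≤ c → v ∈ S := by
  have := Ffree_spec S c.toNat c (le_refl _)
  rwa [h] at this

theorem Ffree_eq_none_of {S : Finset ℤ} {c : ℤ} (h : ∀ v : ℤ, 1 ≤ v → v ≤ c → v ∈ S) :
    Ffree S c = none := by
  rcases hf : Ffree S c with _ | a
  · rfl
  · have hp := Ffree_some_props hf
    exact absurd (h a hp.1 hp.2.1) hp.2.2.1

theorem Ffree_eq_some_of {S : Finset ℤ} {c a : ℤ} (h1 : 1 ≤ a) (h2 : a ≤ c) (h3 : a ∉ S)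
    (hmax : ∀ v : ℤ, 1 ≤ v → v ≤ c → v ∉ S → v ≤ a) : Ffree S c = some a := by
  rcases hf : Ffree S c with _ | b
  · exact absurd (Ffree_none_props hf a h1 h2) h3
  · have hp := Ffree_some_props hf
    have hba : b ≤ a := hmax b hp.1 hp.2.1 hp.2.2.1
    have hab : a ≤ b := hp.2.2.2 a h1 h2 h3
    rw [le_antisymm hba hab]

theorem stepS_comm_le (S : Finset ℤ) {c d : ℤ} (hcd : c ≤ d) :
    stepS (stepS S c) d = stepS (stepS S d) c := by
  rcases hd : Ffree S d with _ | b
  · -- nothing free ≤ d, hence nothing free ≤ c either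
    have hdall := Ffree_none_props hd
    have hc : Ffree S c = none := Ffree_eq_none_of (fun v h1 h2 => hdall v h1 (by omega))
    simp [stepS, hc, hd]
  · have hbp := Ffree_some_props hd
    rcases hc : Ffree S c with _ | a
    · -- nothing free ≤ c: both orders give insert b S
      have hcall := Ffree_none_props hc
      have hbc : Ffree (insert b S) c = none :=
        Ffree_eq_none_of (fun v h1 h2 => Finset.mem_insert_of_mem (hcall v h1 h2))
      simp [stepS, hc, hd, hbc]
    · have hap := Ffree_some_props hc
      have hab : a ≤ b := hbp.2.2.2 a hap.1 (by omega) hap.2.2.1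
      rcases eq_or_lt_of_le hab with rfl | hlt
      · -- a = b: everything in (a, d] is used; both sides continue identically from insert a S
        have hused : ∀ v : ℤ, a < v → v ≤ d → v ∈ S := by
          intro v hv1 hv2
          by_contra hvS
          exact absurd (hbp.2.2.2 v (by omega) hv2 hvS) (by omega)
        have heq : Ffree (insert a S) d = Ffree (insert a S) c := by
          rcases h2 : Ffree (insert a S) c with _ | e
          · apply Ffree_eq_none_of
            intro v h1 hvd
            by_cases hvc : v ≤ c
            · exact Ffree_none_props h2 v h1 hvc
            · exact Finset.mem_insert_of_mem (hused v (by omega) hvd)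
          · have hep := Ffree_some_props h2
            apply Ffree_eq_some_of hep.1 (by omega) hep.2.2.1
            intro v h1 hvd hvS
            by_cases hvc : v ≤ c
            · exact hep.2.2.2 v h1 hvc hvS
            · exact absurd (Finset.mem_insert_of_mem (hused v (by omega) hvd)) hvS
        simp only [stepS, hc, hd, heq]
      · -- a < b
        have hbd : Ffree (insert a S) d = some b := by
          apply Ffree_eq_some_of hbp.1 hbp.2.1
          · simp only [Finset.mem_insert]
            push_neg
            exact ⟨by omega, hbp.2.2.1⟩
          · intro v h1 h2 h3
            simp only [Finset.mem_insert] at h3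
            push_neg at h3
            exact hbp.2.2.2 v h1 h2 h3.2
        have hbgtc : c < b := by
          by_contra hbc
          exact absurd (hap.2.2.2 b hbp.1 (by omega) hbp.2.2.1) (by omega)
        have hac : Ffree (insert b S) c = some a := by
          apply Ffree_eq_some_of hap.1 hap.2.1
          · simp only [Finset.mem_insert]
            push_neg
            exact ⟨by omega, hap.2.2.1⟩
          · intro v h1 h2 h3
            simp only [Finset.mem_insert] at h3
            push_neg at h3
            exact hap.2.2.2 v h1 h2 h3.2
        simp only [stepS, hc, hd, hbd, hac]
        exact Finset.insert_comm b a S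

theorem stepS_comm (S : Finset ℤ) (c d : ℤ) :
    stepS (stepS S c) d = stepS (stepS S d) c := by
  rcases le_total c d with h | h
  · exact stepS_comm_le S h
  · exact (stepS_comm_le S h).symm

-- A's while loop computes the abstract pick
theorem whileA_eq : ∀ (n : ℕ) (res : List Int) (i : Int), i.toNat ≤ n →
    whileA res i = (match Ffree res.toFinset i with
      | some v => res ++ [v]
      | none => res) := by
  intro n
  induction n with
  | zero =>
    intro res i hi
    rw [whileA, Ffree]
    simp only [if_neg (by omega : ¬ (0:Int) < i)]
  | succ m ih =>
    intro res i hi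
    rw [whileA, Ffree]
    by_cases hpos : 0 < i
    · simp only [if_pos hpos]
      have hmem : res.contains i = decide (i ∈ res.toFinset) := by
        simp [List.contains_iff_mem, List.mem_toFinset]
      by_cases hin : i ∈ res.toFinset
      · simp only [hmem, hin, decide_true, if_pos rfl, if_pos hin]
        exact ih res (i - 1) (by omega)
      · rw [if_neg hin, hmem]
        simp only [hin, decide_false, Bool.false_eq_true, if_false]
    · simp only [if_neg hpos]

-- A's outer step computes the abstract pick (for i ≥ 1)
theorem stepA_eq (res : List Int) (i : Int) (hi : 1 ≤ i) :
    stepA res i = (match Ffree res.toFinset i with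
      | some v => res ++ [v]
      | none => res) := by
  unfold stepA
  by_cases hin : i ∈ res
  · rw [if_pos (by simpa [List.contains_iff_mem] using hin)]
    exact whileA_eq i.toNat res i (le_refl _)
  · rw [if_neg (by simpa [List.contains_iff_mem] using hin)]
    have : Ffree res.toFinset i = some i :=
      Ffree_eq_some_of hi (le_refl i) (by simpa [List.mem_toFinset] using hin)
        (fun v _ h2 _ => h2)
    rw [this]

-- fold correspondence: A's list fold tracks the abstract set fold
theorem foldA_correspond : ∀ (l : List Int), (∀ c ∈ l, 1 ≤ c) → ∀ res : List Int, res.Nodup →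
    (l.foldl stepA res).Nodup ∧ (l.foldl stepA res).toFinset = l.foldl stepS res.toFinset := by
  intro l
  induction l with
  | nil => intro _ res h; exact ⟨h, rfl⟩
  | cons c t ih =>
    intro hpos res hnd
    have hc1 : 1 ≤ c := hpos c (List.mem_cons_self ..)
    simp only [List.foldl_cons]
    have hstep := stepA_eq res c hc1
    have hkey : (stepA res c).Nodup ∧ (stepA res c).toFinset = stepS res.toFinset c := by
      rcases hf : Ffree res.toFinset c with _ | v
      · rw [hf] at hstep
        simp only [stepS, hf]
        exact ⟨by rw [hstep]; exact hnd, by rw [hstep]⟩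
      · rw [hf] at hstep
        have hv := Ffree_some_props hf
        have hvnot : v ∉ res := by
          intro hmem; exact hv.2.2.1 (List.mem_toFinset.mpr hmem)
        constructor
        · rw [hstep]
          rw [List.nodup_append]
          refine ⟨hnd, List.nodup_singleton v, ?_⟩
          intro a ha b hb
          simp only [List.mem_singleton] at hb
          subst hb
          exact fun hab => hvnot (hab ▸ ha)
        · rw [hstep]
          simp only [stepS, hf]
          ext x
          simp [List.mem_toFinset, List.mem_append, or_comm]
    obtain ⟨h1, h2⟩ := ih (fun x hx => hpos x (List.mem_cons_of_mem _ hx)) (stepA res c) hkey.1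
    exact ⟨h1, by rw [h2, hkey.2]⟩

-- B's pass over a descending list of positives sums the abstract fold
theorem bpass_correct : ∀ (l : List Int) (S : Finset ℤ) (prev c0 total : ℤ),
    l.Pairwise (fun a b => b ≤ a) → (∀ c ∈ l, 1 ≤ c) → (∀ c ∈ l, c ≤ c0) →
    0 ≤ prev →
    (∀ v : ℤ, 1 ≤ v → v < prev → v ∉ S) →
    (∀ v : ℤ, 1 ≤ v → prev ≤ v → v ≤ c0 → v ∈ S) →
    total = S.sum id →
    (l.foldl (fun (st : Int × Int) c =>
      let take := min c (st.2 - 1)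
      let take := if take < 0 then 0 else take
      (st.1 + take, take)) (total, prev)).1 = (l.foldl stepS S).sum id := by
  intro l
  induction l with
  | nil => intro S prev c0 total _ _ _ _ _ _ htot; simpa using htot
  | cons c t ih =>
    intro S prev c0 total hdesc hpos hble hprev hlow hhigh htot
    have hc1 : 1 ≤ c := hpos c (List.mem_cons_self ..)
    have hcc0 : c ≤ c0 := hble c (List.mem_cons_self ..)
    have htle : ∀ b ∈ t, b ≤ c := fun b hb => (List.pairwise_cons.mp hdesc).1 b hb
    have htdesc := (List.pairwise_cons.mp hdesc).2
    have htpos : ∀ b ∈ t, 1 ≤ b := fun b hb => hpos b (List.mem_cons_of_mem _ hb)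
    simp only [List.foldl_cons]
    by_cases hp1 : prev ≤ 1
    · -- everything from 1 to c0 is already used: no pick, take clamps to 0
      have hmin : min c (prev - 1) = prev - 1 := min_eq_right (by omega)
      have hstep : stepS S c = S := by
        unfold stepS
        rw [Ffree_eq_none_of (fun v h1 h2 => hhigh v h1 (by omega) (by omega))]
      have hclamp : (if min c (prev - 1) < 0 then (0:ℤ) else min c (prev - 1)) = prev - 1 ∨
          (if min c (prev - 1) < 0 then (0:ℤ) else min c (prev - 1)) = 0 := by
        rw [hmin]; split <;> omega
      have htk : (if min c (prev - 1) < 0 then (0:ℤ) else min c (prev - 1)) = 0 := by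
        rw [hmin]; split <;> omega
      simp only [htk, hstep, add_zero]
      exact ih S 0 c0 total htdesc htpos (fun b hb => le_trans (htle b hb) hcc0)
        (le_refl 0) (fun v h1 h2 => absurd h2 (by omega))
        (fun v h1 _ h3 => hhigh v h1 (by omega) h3) htot
    · by_cases hcp : c ≤ prev - 1
      · -- take = c
        have hmin : min c (prev - 1) = c := min_eq_left hcp
        have htk : (if min c (prev - 1) < 0 then (0:ℤ) else min c (prev - 1)) = c := by
          rw [hmin]; split <;> omega
        have hcS : c ∉ S := hlow c hc1 (by omega)
        have hstep : stepS S c = insert c S := by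
          unfold stepS
          rw [Ffree_eq_some_of hc1 (le_refl c) hcS (fun v _ h2 _ => h2)]
        simp only [htk, hstep]
        apply ih (insert c S) c c (total + c) htdesc htpos htle (by omega)
        · intro v h1 h2
          simp only [Finset.mem_insert]
          push_neg
          exact ⟨by omega, hlow v h1 (by omega)⟩
        · intro v h1 h2 h3
          have : v = c := le_antisymm h3 h2
          simp [this]
        · rw [Finset.sum_insert hcS, htot]; simp [add_comm]
      · -- take = prev - 1
        have hmin : min c (prev - 1) = prev - 1 := min_eq_right (by omega)
        have htk : (if min c (prev - 1) < 0 then (0:ℤ) else min c (prev - 1)) = prev - 1 := by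
          rw [hmin]; split <;> omega
        have hpS : prev - 1 ∉ S := hlow (prev - 1) (by omega) (by omega)
        have hstep : stepS S c = insert (prev - 1) S := by
          unfold stepS
          rw [Ffree_eq_some_of (by omega) (by omega) hpS ?_]
          intro v h1 h2 h3
          by_contra hv
          exact h3 (hhigh v h1 (by omega) (by omega))
        simp only [htk, hstep]
        apply ih (insert (prev - 1) S) (prev - 1) c0 (total + (prev - 1)) htdesc htpos
          (fun b hb => le_trans (htle b hb) hcc0) (by omega)
        · intro v h1 h2
          simp only [Finset.mem_insert]
          push_neg
          exact ⟨by omega, hlow v h1 (by omega)⟩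
        · intro v h1 h2 h3
          rcases eq_or_lt_of_le h2 with h | h
          · simp [← h]
          · exact Finset.mem_insert_of_mem (hhigh v h1 (by omega) h3)
        · rw [Finset.sum_insert hpS, htot]; simp [add_comm]

-- A's frequency step is B's frequency step
theorem freqStepA_eq (d : PySem.Dict Int Int) (i : Int) :
    freqStepA d i = d.insert i (d.getD i 0 + 1) := by
  unfold freqStepA
  by_cases h : d.contains i
  · rw [if_pos h]; rfl
  · rw [if_neg h, PySem.Dict.getD_of_not_contains _ _ (by simpa using h)]
    norm_num

-- the multiplicities are the values of Counter(arr), each between 1 and len(arr)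
theorem counts_bounds (arr : List Int) :
    ∀ c ∈ (PySem.Dict.counter arr).values, 1 ≤ c ∧ c ≤ (arr.length : Int) := by
  intro c hc
  have : (PySem.Dict.counter arr).values =
      (PySem.Set.ofList arr).map (fun k => ((arr.count k : Int))) := by
    show ((PySem.Dict.counter arr).items).map (·.2) = _
    rw [PySem.Dict.items_counter]
    simp
  rw [this] at hc
  simp only [List.mem_map] at hc
  obtain ⟨k, hk, rfl⟩ := hc
  have hkmem : k ∈ arr := (PySem.Set.mem_ofList _ _).mp hk
  constructor
  · exact_mod_cast List.count_pos_iff.mpr hkmem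
  · exact_mod_cast List.count_le_length

-- main equality
theorem solve_eq_alt (n : Int) (arr : List Int) : solve n arr = solve_alt n arr := by
  have hfreq : arr.foldl freqStepA PySem.Dict.empty = PySem.Dict.counter arr := by
    rw [show arr.foldl freqStepA PySem.Dict.empty
        = arr.foldl (fun d x => d.insert x (d.getD x 0 + 1)) PySem.Dict.empty from
      List.foldl_ext _ _ _ (fun d x _ => freqStepA_eq d x)]
    exact PySem.Dict.foldl_insert_getD_add_one_eq_counter arr
  unfold solve solve_alt
  simp only [hfreq, PySem.Dict.foldl_insert_getD_add_one_eq_counter]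
  have hb := counts_bounds arr
  have hpos : ∀ c ∈ (PySem.Dict.counter arr).values, 1 ≤ c := fun c h => (hb c h).1
  obtain ⟨hnd, hfs⟩ := foldA_correspond (PySem.Dict.counter arr).values hpos [] List.nodup_nil
  rw [List.toFinset_nil] at hfs
  have hsum : ((PySem.Dict.counter arr).values.foldl stepA []).sum
      = ((PySem.Dict.counter arr).values.foldl stepS ∅).sum id := by
    have h1 := List.sum_toFinset id hnd
    rw [List.map_id] at h1
    rw [← h1, hfs]
  have hperm : (PySem.List.sorted (PySem.Dict.counter arr).values (fun c => c) true).Perm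
      (PySem.Dict.counter arr).values :=
    PySem.List.sorted_perm _ _ _
  have hfold : (PySem.Dict.counter arr).values.foldl stepS ∅
      = (PySem.List.sorted (PySem.Dict.counter arr).values (fun c => c) true).foldl stepS ∅ :=
    (@List.Perm.foldl_eq _ _ stepS _ _ ⟨stepS_comm⟩ hperm ∅).symm
  have hdesc : (PySem.List.sorted (PySem.Dict.counter arr).values (fun c => c) true).Pairwise
      (fun a b => b ≤ a) := by
    simpa using PySem.List.sorted_pairwise_rev (PySem.Dict.counter arr).values (fun c => c)
  have hbs : ∀ c ∈ (PySem.List.sorted (PySem.Dict.counter arr).values (fun c => c) true),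
      1 ≤ c ∧ c ≤ (arr.length : Int) := fun c hc => hb c (hperm.mem_iff.mp hc)
  have hpass := bpass_correct
    (PySem.List.sorted (PySem.Dict.counter arr).values (fun c => c) true)
    ∅ ((arr.length : Int) + 1) (arr.length : Int) 0
    hdesc (fun c h => (hbs c h).1) (fun c h => (hbs c h).2)
    (by omega)
    (fun v _ _ => Finset.notMem_empty v)
    (by intro v h1 h2 h3; exfalso; omega)
    (by simp)
  rw [hsum, hfold, ← hpass]

-- ===== VERDICT (by name: the statement is the Claim_ definition above) =====
theorem solve_spec : Claim_equal_solve := by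
  intro n arr _
  exact solve_eq_alt n arr
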